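-- pv_equiv track=rewrite | github.com/XHe-AWS/OpenClaw-Memory-on-AWS-OpenSearch | dreaming/light.py | _parse_candidates
-- ===== SOURCE A (Python) =====
-- def _parse_candidates(text: str) -> list[tuple[str, str]]:
--     """Parse LLM output into (category, content) tuples."""
--     candidates = []
--     for line in text.strip().split("\n"):
--         line = line.strip()
--         if not line:
--             continue
--         # Match [Category] content
--         if line.startswith("[") and "]" in line:
--             bracket_end = line.index("]")
--             category = line[1:bracket_end].strip()
--             content = line[bracket_end + 1:].strip()
--             if content:
--                 candidates.append((category, content))
--         elif line.startswith("- [") and "]" in line: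
--             # Handle "- [Category] content" format
--             bracket_start = line.index("[")
--             bracket_end = line.index("]")
--             category = line[bracket_start + 1:bracket_end].strip()
--             content = line[bracket_end + 1:].strip()
--             if content:
--                 candidates.append((category, content))
--     return candidates
-- ===== SOURCE B (Python) =====
-- def _parse_candidates(text: str) -> list[tuple[str, str]]:
--     """Parse LLM output into (category, content) tuples."""
--     candidates = []
--     for raw in text.strip().split("\n"):
--         # Per-line character DFA: 0=start, 1=saw '-', 2=saw '- ', 3=in category,
--         # 4=in content, -1=reject.
--         state = 0
--         cat_chars = []
--         content_chars = []
--         for ch in raw.strip():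
--             if state == 0:
--                 if ch == '[':
--                     state = 3
--                 elif ch == '-':
--                     state = 1
--                 else:
--                     state = -1
--                     break
--             elif state == 1:
--                 if ch == ' ':
--                     state = 2
--                 else:
--                     state = -1
--                     break
--             elif state == 2:
--                 if ch == '[':
--                     state = 3
--                 else:
--                     state = -1
--                     break
--             elif state == 3:
--                 if ch == ']':
--                     state = 4
--                 else:
--                     cat_chars.append(ch)
--             else:
--                 content_chars.append(ch)
--         if state == 4:
--             content = ''.join(content_chars).strip()
--             if content:
--                 candidates.append((''.join(cat_chars).strip(), content))
--     return candidates
-- ===== Notes on version B (the rewrite author's own statement) =====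
-- stated objective: alternative
-- what changed: A's two prefix-test branches with index()/slice arithmetic are replaced by an explicit per-line character DFA (states start / saw '-' / saw '- ' / category / content) that consumes each stripped line once, accumulating category and content characters directly.
import Mathlib
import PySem

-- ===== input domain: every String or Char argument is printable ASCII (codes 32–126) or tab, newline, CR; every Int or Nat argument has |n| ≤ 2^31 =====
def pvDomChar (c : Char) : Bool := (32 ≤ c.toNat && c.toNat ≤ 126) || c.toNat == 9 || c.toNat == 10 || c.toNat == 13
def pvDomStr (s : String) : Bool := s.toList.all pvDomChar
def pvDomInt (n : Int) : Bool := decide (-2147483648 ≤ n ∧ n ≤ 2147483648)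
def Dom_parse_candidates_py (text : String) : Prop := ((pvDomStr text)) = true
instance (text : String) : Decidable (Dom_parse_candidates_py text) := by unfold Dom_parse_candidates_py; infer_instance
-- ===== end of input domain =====

-- B replaces A's prefix-test + index()/slice branches by an explicit per-line character DFA (alternative decomposition; same cost).

-- ===== PORT A =====
-- literal transliteration of _parse_candidates: fold over lines, appending to `candidates`.
-- line.index("]") is ported as PySem.Str.find: it is only evaluated under the guard `"]" in line`,
-- where Python's index and find agree (no ValueError is reachable), likewise line.index("[") under
-- the guard startswith("- [").
-- body of the `[Category] content` branch
def pvA_branch1 (cands : List (String × String)) (line : String) : List (String × String) :=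
  let bracket_end : Int := PySem.Str.find line "]"
  let category := PySem.Str.strip (PySem.Str.slice line (some 1) (some bracket_end))
  let content := PySem.Str.strip (PySem.Str.slice line (some (bracket_end + 1)) none)
  if content = "" then cands else cands ++ [(category, content)]

-- body of the `- [Category] content` branch
def pvA_branch2 (cands : List (String × String)) (line : String) : List (String × String) :=
  let bracket_start : Int := PySem.Str.find line "["
  let bracket_end : Int := PySem.Str.find line "]"
  let category := PySem.Str.strip (PySem.Str.slice line (some (bracket_start + 1)) (some bracket_end))
  let content := PySem.Str.strip (PySem.Str.slice line (some (bracket_end + 1)) none)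
  if content = "" then cands else cands ++ [(category, content)]

def pvA_step (cands : List (String × String)) (line0 : String) : List (String × String) :=
  let line := PySem.Str.strip line0
  if line = "" then cands
  else if PySem.Str.startswith line "[" && PySem.Str.isIn "]" line then
    pvA_branch1 cands line
  else if PySem.Str.startswith line "- [" && PySem.Str.isIn "]" line then
    pvA_branch2 cands line
  else cands

def parse_candidates_py (text : String) : List (String × String) :=
  ((PySem.Str.split? (PySem.Str.strip text) "\n").getD []).foldl pvA_step []

-- ===== PORT B =====
-- Source B's inner `for ch in raw.strip()` loop: an explicit DFA over the characters.
-- States mirror Source B: 0 start, 1 saw '-', 2 saw '- ', 3 in category, 4 in content, -1 reject;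
-- Python's `break` is modelled by returning immediately with state -1.
def pvB_scan : List Char → Int → List Char → List Char → Int × List Char × List Char
  | [], st, cat, cont => (st, cat, cont)
  | ch :: rest, st, cat, cont =>
    if st = 0 then
      if ch = '[' then pvB_scan rest 3 cat cont
      else if ch = '-' then pvB_scan rest 1 cat cont
      else (-1, cat, cont)
    else if st = 1 then
      if ch = ' ' then pvB_scan rest 2 cat cont else (-1, cat, cont)
    else if st = 2 then
      if ch = '[' then pvB_scan rest 3 cat cont else (-1, cat, cont)
    else if st = 3 then
      if ch = ']' then pvB_scan rest 4 cat cont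
      else pvB_scan rest 3 (cat ++ [ch]) cont
    else pvB_scan rest st cat (cont ++ [ch])

-- the tail of Source B's loop body: emit the pair if the DFA ended in the content state
def pvB_step (cands : List (String × String)) (raw : String) : List (String × String) :=
  let r := pvB_scan (PySem.Str.strip raw).toList 0 [] []
  if r.1 = 4 then
    let content := PySem.Str.strip (String.ofList r.2.2)
    if content = "" then cands
    else cands ++ [(PySem.Str.strip (String.ofList r.2.1), content)]
  else cands

def parse_candidates_py_alt (text : String) : List (String × String) :=
  ((PySem.Str.split? (PySem.Str.strip text) "\n").getD []).foldl pvB_step []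

-- ===== PRECONDITION & SPEC =====
def Spec_parse_candidates_py (text : String) (out : List (String × String)) : Prop := out = parse_candidates_py_alt text
instance (text : String) (out : List (String × String)) : Decidable (Spec_parse_candidates_py text out) := by unfold Spec_parse_candidates_py; infer_instance

-- ===== CLAIM (what is proved, stated in full; the proofs are below) =====
def Claim_equal_parse_candidates_py : Prop := ∀ (text : String), Dom_parse_candidates_py text → Spec_parse_candidates_py text (parse_candidates_py text)

-- ===== LEMMAS AND PROOFS =====

-- proof-side characterisation of "split at the first ']'"
def pvPartition1 : List Char → Option (List Char × List Char)
  | [] => none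
  | c :: rest =>
    if c = ']' then some ([], rest)
    else (pvPartition1 rest).map (fun pr => (c :: pr.1, pr.2))

theorem pv_singleton_infix_iff_mem (c : Char) (l : List Char) : [c] <:+: l ↔ c ∈ l := by
  constructor
  · rintro ⟨s, t, rfl⟩; simp
  · intro h
    obtain ⟨s, t, rfl⟩ := List.append_of_mem h
    exact ⟨s, t, by simp⟩

theorem pvPartition1_eq_none_iff (cs : List Char) : pvPartition1 cs = none ↔ ']' ∉ cs := by
  induction cs with
  | nil => simp [pvPartition1]
  | cons c rest ih =>
    by_cases hc : c = ']'
    · subst hc; simp [pvPartition1]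
    · simp [pvPartition1, hc, Option.map_eq_none_iff, ih, Ne.symm hc]

theorem pvPartition1_eq_some (cs p q : List Char) (h : pvPartition1 cs = some (p, q)) :
    cs = p ++ ']' :: q ∧ ']' ∉ p := by
  induction cs generalizing p q with
  | nil => simp [pvPartition1] at h
  | cons c rest ih =>
    by_cases hc : c = ']'
    · subst hc
      rw [pvPartition1, if_pos rfl, Option.some_inj] at h
      obtain ⟨rfl, rfl⟩ := h
      simp
    · simp only [pvPartition1, if_neg hc, Option.map_eq_some_iff] at h
      obtain ⟨⟨p1, q1⟩, hp1, heq⟩ := h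
      simp only [Prod.mk.injEq] at heq
      obtain ⟨h1, h2⟩ := heq
      obtain ⟨hrest, hnp⟩ := ih p1 q1 hp1
      subst hrest
      subst h2
      rw [← h1]
      exact ⟨by simp, by simp [hnp, Ne.symm hc]⟩

-- DFA facts
theorem pv_scan4 (cs : List Char) (cat cont : List Char) :
    pvB_scan cs 4 cat cont = (4, cat, cont ++ cs) := by
  induction cs generalizing cont with
  | nil => simp [pvB_scan]
  | cons c rest ih => simp [pvB_scan, ih]

theorem pv_scan3_split (p q cat cont : List Char) (hnp : ']' ∉ p) :
    pvB_scan (p ++ ']' :: q) 3 cat cont = (4, cat ++ p, cont ++ q) := by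
  induction p generalizing cat with
  | nil => simp [pvB_scan, pv_scan4]
  | cons c p ih =>
    have hc : ¬ (c = ']') := fun h => hnp (h ▸ List.mem_cons_self)
    have hnp' : ']' ∉ p := fun h => hnp (List.mem_cons_of_mem _ h)
    simp only [List.cons_append, pvB_scan, if_neg hc]
    norm_num
    rw [ih (cat ++ [c]) hnp']
    simp

theorem pv_scan3_none (cs cat cont : List Char) (h : ']' ∉ cs) :
    (pvB_scan cs 3 cat cont).1 = 3 := by
  induction cs generalizing cat with
  | nil => simp [pvB_scan]
  | cons c rest ih =>
    have hc : ¬ (c = ']') := fun hx => h (hx ▸ List.mem_cons_self)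
    simp only [pvB_scan, if_neg hc]
    norm_num
    exact ih _ (fun hx => h (List.mem_cons_of_mem _ hx))

theorem pv_find_singleton (cs : List Char) (c : Char) (p q : List Char)
    (hcs : cs = p ++ c :: q) (hc : c ∉ p) : PySem.Chars.find cs [c] = (p.length : Int) := by
  have hmem : [c] <:+: cs := by rw [pv_singleton_infix_iff_mem, hcs]; simp
  have h0 : 0 ≤ PySem.Chars.find cs [c] := (PySem.Chars.find_nonneg_iff cs [c]).2 hmem
  obtain ⟨hpre, hmin⟩ := PySem.Chars.find_spec h0
  set n := (PySem.Chars.find cs [c]).toNat with hn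
  have hle : n ≤ p.length := by
    by_contra hlt
    exact hmin p.length (by omega) (by rw [hcs, List.drop_left]; exact ⟨q, rfl⟩)
  have hge : p.length ≤ n := by
    by_contra hlt
    obtain ⟨t, ht⟩ := hpre
    have hdrop : cs.drop n = c :: t := by simpa using ht.symm
    have hget : cs[n]? = some c := by
      have h2 := congrArg (·[0]?) hdrop
      simpa [List.getElem?_drop] using h2
    have hnp : n < p.length := by omega
    have hpn : p[n]? = some c := by
      rw [hcs] at hget
      rwa [List.getElem?_append_left hnp] at hget
    exact hc (List.mem_of_getElem? hpn)
  have hnl : n = p.length := le_antisymm hle hge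
  omega

theorem pv_str_eq_of_toList {s t : String} (h : s.toList = t.toList) : s = t :=
  String.toList_inj.mp h

theorem pv_sw (s p : String) : PySem.Str.startswith s p = true ↔ p.toList <+: s.toList := by
  rw [PySem.Str.startswith_eq, PySem.Chars.startswith_iff]

theorem pv_not_prefix_len {α : Type} {ps ds : List α} (h : ds.length < ps.length) :
    ¬ ps <+: ds := fun hp => absurd hp.length_le (by omega)

theorem pv_ite_false {α : Type} (a b : α) : (if (false = true) then a else b) = b := rfl

theorem pv_slice_nn {α : Type} (xs : List α) (a b : Int) (ha : 0 ≤ a) (hb : 0 ≤ b) :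
    PySem.List.slice xs (some a) (some b) = (xs.drop a.toNat).take (b.toNat - a.toNat) := by
  lift a to Nat using ha with m
  lift b to Nat using hb with n
  rw [PySem.List.slice_natCast]
  simp

theorem pv_hit1_find (s : String) (p q : List Char)
    (hcs : s.toList = '[' :: (p ++ ']' :: q)) (hnp : ']' ∉ p) :
    PySem.Str.find s "]" = ((p.length + 1 : Nat) : Int) := by
  have hrb : ("]" : String).toList = [']'] := rfl
  rw [PySem.Str.find_eq, hcs, hrb]
  have h2 := pv_find_singleton ('[' :: (p ++ ']' :: q)) ']' ('[' :: p) q (by simp) (by simp [hnp])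
  rw [h2]
  simp

theorem pv_hit1_cat (s : String) (p q : List Char)
    (hcs : s.toList = '[' :: (p ++ ']' :: q))
    (hfind : PySem.Str.find s "]" = ((p.length + 1 : Nat) : Int)) :
    PySem.Str.strip (PySem.Str.slice s (some 1) (some (PySem.Str.find s "]"))) =
      PySem.Str.strip (String.ofList p) := by
  apply pv_str_eq_of_toList
  rw [PySem.Str.toList_strip, PySem.Str.toList_strip, PySem.Str.toList_slice,
    PySem.Chars.slice_eq_listSlice, hfind, hcs, String.toList_ofList]
  congr 1
  rw [pv_slice_nn _ _ _ (by norm_num) (by positivity)]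
  simp only [Int.toNat_one, Int.toNat_natCast, List.drop_succ_cons, List.drop_zero,
    Nat.add_sub_cancel]
  exact List.take_left

theorem pv_hit1_cont (s : String) (p q : List Char)
    (hcs : s.toList = '[' :: (p ++ ']' :: q))
    (hfind : PySem.Str.find s "]" = ((p.length + 1 : Nat) : Int)) :
    PySem.Str.strip (PySem.Str.slice s (some (PySem.Str.find s "]" + 1)) none) =
      PySem.Str.strip (String.ofList q) := by
  apply pv_str_eq_of_toList
  rw [PySem.Str.toList_strip, PySem.Str.toList_strip, PySem.Str.toList_slice,
    PySem.Chars.slice_eq_listSlice, hfind, hcs, String.toList_ofList]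
  congr 1
  rw [show ((p.length + 1 : Nat) : Int) + 1 = ((p.length + 2 : Nat) : Int) by push_cast; ring]
  rw [PySem.List.slice_from _ (by positivity), Int.toNat_natCast]
  rw [show '[' :: (p ++ ']' :: q) = ('[' :: p ++ [']']) ++ q by simp]
  rw [show p.length + 2 = ('[' :: p ++ [']']).length by simp]
  exact List.drop_left

theorem pv_hit2_findL (s : String) (p q : List Char)
    (hcs : s.toList = '-' :: ' ' :: '[' :: (p ++ ']' :: q)) :
    PySem.Str.find s "[" = (2 : Int) := by
  have hlb : ("[" : String).toList = ['['] := rfl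
  rw [PySem.Str.find_eq, hcs, hlb]
  have h2 := pv_find_singleton ('-' :: ' ' :: '[' :: (p ++ ']' :: q)) '['
    ['-', ' '] (p ++ ']' :: q) (by simp) (by decide)
  rw [h2]
  simp

theorem pv_hit2_findR (s : String) (p q : List Char)
    (hcs : s.toList = '-' :: ' ' :: '[' :: (p ++ ']' :: q)) (hnp : ']' ∉ p) :
    PySem.Str.find s "]" = ((p.length + 3 : Nat) : Int) := by
  have hrb : ("]" : String).toList = [']'] := rfl
  rw [PySem.Str.find_eq, hcs, hrb]
  have h2 := pv_find_singleton ('-' :: ' ' :: '[' :: (p ++ ']' :: q)) ']'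
    ('-' :: ' ' :: '[' :: p) q (by simp) (by simp [hnp])
  rw [h2]
  simp only [List.length_cons]

theorem pv_hit2_cat (s : String) (p q : List Char)
    (hcs : s.toList = '-' :: ' ' :: '[' :: (p ++ ']' :: q))
    (hfindL : PySem.Str.find s "[" = (2 : Int))
    (hfindR : PySem.Str.find s "]" = ((p.length + 3 : Nat) : Int)) :
    PySem.Str.strip (PySem.Str.slice s (some (PySem.Str.find s "[" + 1))
        (some (PySem.Str.find s "]"))) =
      PySem.Str.strip (String.ofList p) := by
  apply pv_str_eq_of_toList
  rw [PySem.Str.toList_strip, PySem.Str.toList_strip, PySem.Str.toList_slice,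
    PySem.Chars.slice_eq_listSlice, hfindL, hfindR, hcs, String.toList_ofList]
  congr 1
  rw [pv_slice_nn _ _ _ (by norm_num) (by positivity)]
  rw [show ((2:Int) + 1).toNat = 3 from by decide, Int.toNat_natCast]
  simp only [List.drop_succ_cons, List.drop_zero, Nat.add_sub_cancel]
  exact List.take_left

theorem pv_hit2_cont (s : String) (p q : List Char)
    (hcs : s.toList = '-' :: ' ' :: '[' :: (p ++ ']' :: q))
    (hfindR : PySem.Str.find s "]" = ((p.length + 3 : Nat) : Int)) :
    PySem.Str.strip (PySem.Str.slice s (some (PySem.Str.find s "]" + 1)) none) =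
      PySem.Str.strip (String.ofList q) := by
  apply pv_str_eq_of_toList
  rw [PySem.Str.toList_strip, PySem.Str.toList_strip, PySem.Str.toList_slice,
    PySem.Chars.slice_eq_listSlice, hfindR, hcs, String.toList_ofList]
  congr 1
  rw [show ((p.length + 3 : Nat) : Int) + 1 = ((p.length + 4 : Nat) : Int) by push_cast; ring]
  rw [PySem.List.slice_from _ (by positivity), Int.toNat_natCast]
  rw [show '-' :: ' ' :: '[' :: (p ++ ']' :: q) = ('-' :: ' ' :: '[' :: p ++ [']']) ++ q by simp]
  rw [show p.length + 4 = ('-' :: ' ' :: '[' :: p ++ [']']).length by simp]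
  exact List.drop_left

set_option maxHeartbeats 1600000 in
theorem pv_step_eq (cands : List (String × String)) (l : String) :
    pvA_step cands l = pvB_step cands l := by
  simp only [pvA_step, pvB_step]
  generalize PySem.Str.strip l = s
  have hlb : ("[" : String).toList = ['['] := rfl
  have hrb : ("]" : String).toList = [']'] := rfl
  have hdlb : ("- [" : String).toList = ['-', ' ', '['] := rfl
  cases hcs : s.toList with
  | nil =>
    have hs : s = "" := pv_str_eq_of_toList (by rw [hcs]; rfl)
    subst hs
    rw [if_pos rfl]
    simp [pvB_scan]
  | cons c rest =>
    have hne : ¬ (s = "") := by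
      intro h; rw [h] at hcs; exact absurd hcs (by simp)
    rw [if_neg hne]
    by_cases hc : c = '['
    · -- line starts with '['
      subst hc
      have hA1 : PySem.Str.startswith s "[" = true := by
        rw [pv_sw, hcs, hlb]; exact List.cons_prefix_cons.mpr ⟨rfl, List.nil_prefix⟩
      have hA3 : PySem.Str.startswith s "- [" = false := by
        refine Bool.eq_false_iff.mpr fun h => ?_
        have h2 := (pv_sw _ _).mp h
        rw [hcs, hdlb] at h2
        exact absurd (List.cons_prefix_cons.mp h2).1 (by decide)
      have hscan0 : ∀ u : List Char, pvB_scan ('[' :: u) 0 [] [] = pvB_scan u 3 [] [] := by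
        intro u; simp [pvB_scan]
      by_cases hmem : ']' ∈ rest
      · cases hp : pvPartition1 rest with
        | none => exact absurd ((pvPartition1_eq_none_iff rest).mp hp) (by simpa using hmem)
        | some pr =>
          obtain ⟨p, q⟩ := pr
          obtain ⟨hrest, hnp⟩ := pvPartition1_eq_some rest p q hp
          subst hrest
          have hA2 : PySem.Str.isIn "]" s = true := by
            rw [PySem.Str.isIn_eq, hcs, hrb, PySem.Chars.isIn_iff_infix,
              pv_singleton_infix_iff_mem]
            simp
          have hfind := pv_hit1_find s p q hcs hnp
          have hcatA := pv_hit1_cat s p q hcs hfind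
          have hcontA := pv_hit1_cont s p q hcs hfind
          rw [hscan0, pv_scan3_split p q [] [] hnp]
          simp only [hA1, hA2, Bool.true_and, if_true, List.nil_append]
          simp only [pvA_branch1]
          rw [hcatA, hcontA]
      · have hA2 : PySem.Str.isIn "]" s = false := by
          refine Bool.eq_false_iff.mpr fun h => ?_
          rw [PySem.Str.isIn_eq, hrb, hcs] at h
          have h2 := (pv_singleton_infix_iff_mem ']' _).mp ((PySem.Chars.isIn_iff_infix _ _).mp h)
          exact hmem (by simpa using h2)
        have hst := pv_scan3_none rest [] [] hmem
        rw [hscan0]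
        have h4 : ¬ ((pvB_scan rest 3 [] []).1 = 4) := by rw [hst]; norm_num
        simp only [hA1, hA2, hA3, Bool.true_and, Bool.false_and, Bool.false_eq_true, if_false, if_neg h4]
    · -- line does not start with '['
      have hA1 : PySem.Str.startswith s "[" = false := by
        refine Bool.eq_false_iff.mpr fun h => ?_
        have h2 := (pv_sw _ _).mp h
        rw [hcs, hlb] at h2
        exact hc (List.cons_prefix_cons.mp h2).1.symm
      by_cases hc2 : c = '-'
      · subst hc2
        cases rest with
        | nil =>
          have hA3 : PySem.Str.startswith s "- [" = false := by
            refine Bool.eq_false_iff.mpr fun h => ?_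
            have h2 := (pv_sw _ _).mp h
            rw [hcs, hdlb] at h2
            exact pv_not_prefix_len (by simp) h2
          rw [if_neg (by rw [hA1]; simp), if_neg (by rw [hA3]; simp)]
          simp [pvB_scan]
        | cons c2 rest2 =>
          by_cases hsp : c2 = ' '
          · subst hsp
            cases rest2 with
            | nil =>
              have hA3 : PySem.Str.startswith s "- [" = false := by
                refine Bool.eq_false_iff.mpr fun h => ?_
                have h2 := (pv_sw _ _).mp h
                rw [hcs, hdlb] at h2
                exact pv_not_prefix_len (by simp) h2
              rw [if_neg (by rw [hA1]; simp), if_neg (by rw [hA3]; simp)]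
              simp [pvB_scan]
            | cons c3 u =>
              by_cases hc3 : c3 = '['
              · subst hc3
                have hA3 : PySem.Str.startswith s "- [" = true := by
                  rw [pv_sw, hcs, hdlb]
                  exact ⟨u, rfl⟩
                have hscan0 : pvB_scan ('-' :: ' ' :: '[' :: u) 0 [] [] = pvB_scan u 3 [] [] := by
                  simp [pvB_scan]
                by_cases hmem : ']' ∈ u
                · cases hp : pvPartition1 u with
                  | none => exact absurd ((pvPartition1_eq_none_iff u).mp hp) (by simpa using hmem)
                  | some pr =>
                    obtain ⟨p, q⟩ := pr
                    obtain ⟨hu, hnp⟩ := pvPartition1_eq_some u p q hp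
                    subst hu
                    have hA2 : PySem.Str.isIn "]" s = true := by
                      rw [PySem.Str.isIn_eq, hcs, hrb, PySem.Chars.isIn_iff_infix,
                        pv_singleton_infix_iff_mem]
                      simp
                    have hfindL := pv_hit2_findL s p q hcs
                    have hfindR := pv_hit2_findR s p q hcs hnp
                    have hcatA := pv_hit2_cat s p q hcs hfindL hfindR
                    have hcontA := pv_hit2_cont s p q hcs hfindR
                    rw [hscan0, pv_scan3_split p q [] [] hnp]
                    simp only [hA1, hA2, hA3, Bool.false_and, Bool.true_and, if_true, Bool.false_eq_true, if_false, List.nil_append]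
                    simp only [pvA_branch2]
                    rw [hcatA, hcontA]
                · have hA2 : PySem.Str.isIn "]" s = false := by
                    refine Bool.eq_false_iff.mpr fun h => ?_
                    rw [PySem.Str.isIn_eq, hrb, hcs] at h
                    have h2 := (pv_singleton_infix_iff_mem ']' _).mp
                      ((PySem.Chars.isIn_iff_infix _ _).mp h)
                    exact hmem (by simpa using h2)
                  have hst := pv_scan3_none u [] [] hmem
                  rw [hscan0]
                  have h4 : ¬ ((pvB_scan u 3 [] []).1 = 4) := by rw [hst]; norm_num
                  simp only [hA1, hA2, hA3, Bool.false_and, Bool.true_and, Bool.false_eq_true,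
                    if_false, if_neg h4]
              · have hA3 : PySem.Str.startswith s "- [" = false := by
                  refine Bool.eq_false_iff.mpr fun h => ?_
                  have h2 := (pv_sw _ _).mp h
                  rw [hcs, hdlb] at h2
                  have h3 := (List.cons_prefix_cons.mp
                    (List.cons_prefix_cons.mp h2).2).2
                  exact hc3 (List.cons_prefix_cons.mp h3).1.symm
                simp only [hA1, hA3, Bool.false_and, pv_ite_false]
                simp [pvB_scan, hc3]
          · have hA3 : PySem.Str.startswith s "- [" = false := by
              refine Bool.eq_false_iff.mpr fun h => ?_
              have h2 := (pv_sw _ _).mp h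
              rw [hcs, hdlb] at h2
              exact hsp (List.cons_prefix_cons.mp (List.cons_prefix_cons.mp h2).2).1.symm
            simp only [hA1, hA3, Bool.false_and, pv_ite_false]
            simp [pvB_scan, hsp]
      · have hA3 : PySem.Str.startswith s "- [" = false := by
          refine Bool.eq_false_iff.mpr fun h => ?_
          have h2 := (pv_sw _ _).mp h
          rw [hcs, hdlb] at h2
          exact hc2 (List.cons_prefix_cons.mp h2).1.symm
        simp only [hA1, hA3, Bool.false_and, pv_ite_false]
        simp [pvB_scan, hc, hc2]

-- ===== VERDICT (by name: the statement is the Claim_ definition above) =====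
theorem parse_candidates_py_spec : Claim_equal_parse_candidates_py := by
  intro text _
  unfold Spec_parse_candidates_py parse_candidates_py parse_candidates_py_alt
  have hfe : pvA_step = pvB_step := funext fun c => funext fun l => pv_step_eq c l
  rw [hfe]
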